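-- pv_equiv track=rewrite | github.com/AndreMoukarzel/uri-online-judge | 1034.py | min_blocks
-- ===== SOURCE A (Python) =====
-- def min_blocks(block_sizes, num_blocks, size):
--     if size % block_sizes[-1] == 0:
--         return int(size/block_sizes[-1])
--
--     min_bps = [9999999 for _ in range(size + 1)]
--     min_bps[0] = 0 # min blocks per size
--     for i in range(num_blocks):
--         for j in range(block_sizes[i], size + 1):
--             min_bps[j] = min(min_bps[j], min_bps[j - block_sizes[i]] + 1)
--     return min_bps[size]
-- ===== SOURCE B (Python) =====
-- def min_blocks(block_sizes, num_blocks, size):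
--     if size % block_sizes[-1] == 0:
--         return int(size / block_sizes[-1])
--
--     # Breadth-first search on amounts: level k holds exactly the amounts
--     # reachable with k blocks; the first level containing `size` is the answer.
--     # The search is capped at the problem's sentinel 9999999 (A's table caps
--     # counts there too), and an exhausted frontier means "unreachable".
--     blocks = [block_sizes[i] for i in range(num_blocks)]
--     usable = [b for b in blocks if 0 < b <= size]
--     visited = {0}
--     frontier = [0]
--     steps = 0
--     while frontier and steps < 9999999:
--         steps += 1
--         nxt = []
--         for a in frontier:
--             for b in usable:
--                 t = a + b
--                 if t == size:
--                     return steps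
--                 if t < size and t not in visited:
--                     visited.add(t)
--                     nxt.append(t)
--         frontier = nxt
--     return 9999999
-- ===== Notes on version B (the rewrite author's own statement) =====
-- stated objective: alternative
-- what changed: Replaces A's bottom-up relaxation table over all amounts (one full pass per block) with a breadth-first search from amount 0 (frontier/visited sets, one level per block count) that stops at the first level containing the target, so no min-table is built; the early-exit shortcut line is kept identical.
import Mathlib
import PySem

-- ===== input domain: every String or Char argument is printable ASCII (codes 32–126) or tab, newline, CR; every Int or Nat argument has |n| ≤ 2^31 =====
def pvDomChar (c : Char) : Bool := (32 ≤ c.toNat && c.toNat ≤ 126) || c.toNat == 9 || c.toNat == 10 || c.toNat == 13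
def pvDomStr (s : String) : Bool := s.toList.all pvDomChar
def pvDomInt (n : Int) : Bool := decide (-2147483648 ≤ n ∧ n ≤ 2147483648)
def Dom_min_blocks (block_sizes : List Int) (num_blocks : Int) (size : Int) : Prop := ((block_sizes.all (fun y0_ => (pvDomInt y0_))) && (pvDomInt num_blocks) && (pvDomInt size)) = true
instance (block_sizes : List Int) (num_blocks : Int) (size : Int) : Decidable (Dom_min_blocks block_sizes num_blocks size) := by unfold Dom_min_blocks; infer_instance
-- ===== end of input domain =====

-- B replaces A's bottom-up min-table over all amounts with a breadth-first search from
-- amount 0 (frontier/visited, one level per block count) that stops at the first level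
-- containing the target (alternative algorithm; the shortcut line is kept identical).

-- Python-list primitives on Lean Array (Python lists are arrays). Index semantics are
-- Python's: negative = from the end; where Python raises IndexError (impossible under
-- Pre_) the total forms read 0 / do nothing.
def pvAGet (xs : Array Int) (i : Int) : Int :=
  let j := if i < 0 then i + xs.size else i
  if 0 ≤ j then xs.getD j.toNat 0 else 0

def pvASet (xs : Array Int) (i : Int) (v : Int) : Array Int :=
  let j := if i < 0 then i + xs.size else i
  if 0 ≤ j then xs.setIfInBounds j.toNat v else xs

-- ===== PORT A =====
def min_blocks (block_sizes : List Int) (num_blocks : Int) (size : Int) : Int :=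
  let last := PySem.List.pyGetD block_sizes (-1) 0
  if PySem.Int.mod size last = 0 then
    -- int(size/last): size is divisible by last and |size|,|last| ≤ 2^31 < 2^53, so the
    -- float division is exact and int() truncation is exactly floor division here
    PySem.Int.floordiv size last
  else
    -- min_bps = [9999999 for _ in range(size+1)]; min_bps[0] = 0
    -- (on size < 0 Python raises IndexError on the assignment — outside Pre_; .set is a no-op there)
    let init := pvASet (Array.replicate (size + 1).toNat (9999999 : Int)) 0 0
    let final := (PySem.List.pyRange 0 num_blocks 1).foldl (fun t i =>
      let b := PySem.List.pyGetD block_sizes i 0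
      (PySem.List.pyRange b (size + 1) 1).foldl (fun t j =>
        pvASet t j (min (pvAGet t j) (pvAGet t (j - b) + 1))) t) init
    pvAGet final size

-- ===== PORT B =====
-- the inner 'for b in usable' loop of one frontier amount a: 'none' = the Python
-- 'return steps' fired (t == size); otherwise the updated (visited, nxt) pair
def pvBfsInner (size a : Int) : List Int → PySem.Set Int → List Int → Option (PySem.Set Int × List Int)
  | [], vis, nxt => some (vis, nxt)
  | b :: us, vis, nxt =>
      if a + b = size then none
      else if a + b < size ∧ PySem.Set.contains vis (a + b) = false then
        pvBfsInner size a us (PySem.Set.add vis (a + b)) (nxt ++ [a + b])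
      else pvBfsInner size a us vis nxt

-- the 'for a in frontier' loop of one BFS level
def pvBfsLevel (size : Int) (usable : List Int) : List Int → PySem.Set Int → List Int → Option (PySem.Set Int × List Int)
  | [], vis, nxt => some (vis, nxt)
  | a :: fr, vis, nxt =>
      match pvBfsInner size a usable vis nxt with
      | none => none
      | some (v, n) => pvBfsLevel size usable fr v n

-- the 'while frontier and steps < 9999999' loop; fuel only makes the recursion
-- structural (size+1 levels always suffice: each level grows `visited`, which
-- lives inside [0, size))
def pvBfs (size : Int) (usable : List Int) : Nat → List Int → PySem.Set Int → Int → Int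
  | 0, _, _, _ => 9999999
  | fuel + 1, frontier, vis, steps =>
      if frontier = [] ∨ 9999999 ≤ steps then 9999999
      else
        match pvBfsLevel size usable frontier vis [] with
        | none => steps + 1
        | some (v, n) => pvBfs size usable fuel n v (steps + 1)

def min_blocks_alt (block_sizes : List Int) (num_blocks : Int) (size : Int) : Int :=
  let last := PySem.List.pyGetD block_sizes (-1) 0
  if PySem.Int.mod size last = 0 then
    PySem.Int.floordiv size last
  else
    let blocks := (PySem.List.pyRange 0 num_blocks 1).map (fun i => PySem.List.pyGetD block_sizes i 0)
    let usable := blocks.filter (fun b => decide (0 < b) && decide (b ≤ size))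
    pvBfs size usable (size.toNat + 1) [0] (PySem.Set.ofList [0]) 0

-- ===== PRECONDITION & SPEC =====
-- Pre_ is exactly A's return domain: A raises IndexError on an empty list, ZeroDivisionError when the
-- last block is 0, and (when the divisibility shortcut does not fire) IndexError when size < 0, when
-- num_blocks exceeds the list length, or when a used block is negative (min_bps[size - b] overflows).
def Pre_min_blocks (block_sizes : List Int) (num_blocks : Int) (size : Int) : Prop :=
  block_sizes ≠ [] ∧ PySem.List.pyGetD block_sizes (-1) 0 ≠ 0 ∧
  (PySem.Int.mod size (PySem.List.pyGetD block_sizes (-1) 0) ≠ 0 →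
    0 ≤ size ∧ num_blocks ≤ (block_sizes.length : Int) ∧
    ∀ b ∈ block_sizes.take num_blocks.toNat, 0 ≤ b)
instance (block_sizes : List Int) (num_blocks : Int) (size : Int) : Decidable (Pre_min_blocks block_sizes num_blocks size) := by unfold Pre_min_blocks; infer_instance

def pvWitness_min_blocks : List Int × Int × Int := ([2, 3], 2, 7)

def Spec_min_blocks (block_sizes : List Int) (num_blocks : Int) (size : Int) (out : Int) : Prop := out = min_blocks_alt block_sizes num_blocks size
instance (block_sizes : List Int) (num_blocks : Int) (size : Int) (out : Int) : Decidable (Spec_min_blocks block_sizes num_blocks size out) := by unfold Spec_min_blocks; infer_instance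

-- ===== CLAIM (what is proved, stated in full; the proofs are below) =====
def Claim_equal_min_blocks : Prop := ∀ (block_sizes : List Int) (num_blocks : Int) (size : Int), Dom_min_blocks block_sizes num_blocks size → Pre_min_blocks block_sizes num_blocks size → Spec_min_blocks block_sizes num_blocks size (min_blocks block_sizes num_blocks size)

-- ===== LEMMAS AND PROOFS =====

-- Reference function: pvBestC C bs a = min number of blocks from bs summing to a, capped at C
-- (0 for a = 0; only blocks b with 0 < b ≤ a are usable).
def pvBestC (C : Int) (bs : List Int) (a : Nat) : Int :=
  if _h : a = 0 then 0
  else bs.foldl (fun r b =>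
    if hb : 0 < b ∧ b ≤ (a : Int) then min r (pvBestC C bs (a - b.toNat) + 1) else r) C
termination_by a
decreasing_by omega

theorem pvBestC_zero (C : Int) (bs : List Int) : pvBestC C bs 0 = 0 := by rw [pvBestC]; simp

theorem pvBestC_eq (C : Int) (bs : List Int) (a : Nat) (h : a ≠ 0) :
    pvBestC C bs a = ((bs.filter (fun b => decide (0 < b ∧ b ≤ (a : Int)))).map
      (fun b => pvBestC C bs (a - b.toNat) + 1)).foldl min C := by
  rw [pvBestC, dif_neg h, List.foldl_map,
    ← PySem.List.foldl_ite_eq_foldl_filter (p := fun b => 0 < b ∧ b ≤ (a : Int))]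
  simp only [dite_eq_ite]

-- c ≤ foldl min r l  from  c ≤ r and c ≤ every element
theorem le_foldl_min {l : List Int} {c r : Int} (hr : c ≤ r) (h : ∀ y ∈ l, c ≤ y) :
    c ≤ l.foldl min r := by
  induction l generalizing r with
  | nil => exact hr
  | cons x t ih =>
      exact ih (le_min hr (h x (List.mem_cons_self))) (fun y hy => h y (List.mem_cons_of_mem _ hy))

theorem pvBestC_le_cap (C : Int) (hC : 0 ≤ C) (bs : List Int) (a : Nat) : pvBestC C bs a ≤ C := by
  rcases Nat.eq_zero_or_pos a with h | h
  · subst h; rw [pvBestC_zero]; exact hC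
  · rw [pvBestC_eq C bs a (by omega)]
    exact (PySem.List.foldl_min_le _ _).1

theorem pvBestC_le_step (C : Int) (bs : List Int) (a : Nat) {b : Int} (hmem : b ∈ bs) (hb : 0 < b)
    (hba : b ≤ (a : Int)) : pvBestC C bs a ≤ pvBestC C bs (a - b.toNat) + 1 := by
  have ha : a ≠ 0 := by omega
  rw [pvBestC_eq C bs a ha]
  refine (PySem.List.foldl_min_le _ _).2 _ ?_
  exact List.mem_map_of_mem (List.mem_filter.mpr ⟨hmem, by simp [hb, hba]⟩)

theorem le_pvBestC (C : Int) (bs : List Int) (a : Nat) {c : Int} (h : a ≠ 0) (hc : c ≤ C)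
    (hstep : ∀ b ∈ bs, 0 < b → b ≤ (a : Int) → c ≤ pvBestC C bs (a - b.toNat) + 1) :
    c ≤ pvBestC C bs a := by
  rw [pvBestC_eq C bs a h]
  refine le_foldl_min hc ?_
  intro y hy
  obtain ⟨b, hbmem, rfl⟩ := List.mem_map.mp hy
  have hb := List.mem_filter.mp hbmem
  have hcond : 0 < b ∧ b ≤ (a : Int) := by simpa using hb.2
  exact hstep b hb.1 hcond.1 hcond.2

theorem pvBestC_nonneg (C : Int) (hC : 0 ≤ C) (bs : List Int) (a : Nat) : 0 ≤ pvBestC C bs a := by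
  induction a using Nat.strong_induction_on with
  | _ a ih =>
    rcases Nat.eq_zero_or_pos a with h | h
    · subst h; rw [pvBestC_zero]
    · rw [pvBestC_eq C bs a (by omega)]
      refine le_foldl_min hC ?_
      intro y hy
      obtain ⟨b, hbmem, rfl⟩ := List.mem_map.mp hy
      have hcond : 0 < b ∧ b ≤ (a : Int) := by simpa using (List.mem_filter.mp hbmem).2
      have := ih (a - b.toNat) (by omega)
      omega

theorem pvBestC_pos (C : Int) (hC : 1 ≤ C) (bs : List Int) (a : Nat) (ha : a ≠ 0) :
    1 ≤ pvBestC C bs a := by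
  rw [pvBestC_eq C bs a ha]
  refine le_foldl_min hC ?_
  intro y hy
  obtain ⟨b, hbmem, rfl⟩ := List.mem_map.mp hy
  have := pvBestC_nonneg C (by omega) bs (a - b.toNat)
  omega

-- adding a block never increases the optimum
theorem pvBestC_append_le (C : Int) (hC : 0 ≤ C) (p : List Int) (c : Int) (a : Nat) :
    pvBestC C (p ++ [c]) a ≤ pvBestC C p a := by
  induction a using Nat.strong_induction_on with
  | _ a ih =>
    rcases Nat.eq_zero_or_pos a with h | h
    · subst h; simp [pvBestC_zero]
    · have ha : a ≠ 0 := by omega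
      rw [pvBestC_eq C p a ha]
      refine le_foldl_min (pvBestC_le_cap C hC _ _) ?_
      intro y hy
      obtain ⟨b, hbmem, rfl⟩ := List.mem_map.mp hy
      have hbf := List.mem_filter.mp hbmem
      have hcond : 0 < b ∧ b ≤ (a : Int) := by simpa using hbf.2
      have h1 : pvBestC C (p ++ [c]) a ≤ pvBestC C (p ++ [c]) (a - b.toNat) + 1 :=
        pvBestC_le_step C _ _ (List.mem_append_left _ hbf.1) hcond.1 hcond.2
      have h2 : pvBestC C (p ++ [c]) (a - b.toNat) ≤ pvBestC C p (a - b.toNat) :=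
        ih (a - b.toNat) (by omega)
      omega

-- an unusable block (non-positive, or larger than the amount) changes nothing
theorem pvBestC_append_of_not (C : Int) (p : List Int) (c : Int) (a : Nat)
    (h : c ≤ 0 ∨ (a : Int) < c) : pvBestC C (p ++ [c]) a = pvBestC C p a := by
  induction a using Nat.strong_induction_on with
  | _ a ih =>
    rcases Nat.eq_zero_or_pos a with h0 | h0
    · subst h0; simp [pvBestC_zero]
    · have ha : a ≠ 0 := by omega
      rw [pvBestC_eq C (p ++ [c]) a ha, pvBestC_eq C p a ha]
      have hcfalse : (decide (0 < c ∧ c ≤ (a : Int))) = false := by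
        rcases h with h | h <;> simp <;> omega
      rw [List.filter_append]
      simp only [List.filter_cons, hcfalse, List.filter_nil, Bool.false_eq_true, if_false,
        List.append_nil]
      congr 1
      refine List.map_congr_left ?_
      intro b hb
      have hbf := List.mem_filter.mp hb
      have hcond : 0 < b ∧ b ≤ (a : Int) := by simpa using hbf.2
      have := ih (a - b.toNat) (by omega) (by rcases h with h | h
                                              · exact Or.inl h
                                              · right; omega)
      omega

-- the one-step recurrence of the relaxation pass
theorem pvBestC_append_rec (C : Int) (hC : 0 ≤ C) (p : List Int) (c : Int) (a : Nat)
    (hc : 0 < c) (hca : c ≤ (a : Int)) :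
    pvBestC C (p ++ [c]) a = min (pvBestC C p a) (pvBestC C (p ++ [c]) (a - c.toNat) + 1) := by
  revert hca
  induction a using Nat.strong_induction_on with
  | _ a ih =>
    intro hca
    have ha : a ≠ 0 := by omega
    apply le_antisymm
    · apply le_min
      · exact pvBestC_append_le C hC p c a
      · exact pvBestC_le_step C _ _ (List.mem_append_right _ (List.mem_singleton_self c)) hc hca
    · refine le_pvBestC C _ _ ha (le_trans (min_le_left _ _) (pvBestC_le_cap C hC p a)) ?_
      intro b hbmem hb hba
      rcases List.mem_append.mp hbmem with hbp | hbc
      · have f1 : pvBestC C p a ≤ pvBestC C p (a - b.toNat) + 1 := pvBestC_le_step C p a hbp hb hba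
        by_cases hc' : c ≤ ((a - b.toNat : Nat) : Int)
        · have hrec := ih (a - b.toNat) (by omega) hc'
          have f2 : pvBestC C (p ++ [c]) (a - c.toNat) ≤
              pvBestC C (p ++ [c]) ((a - c.toNat) - b.toNat) + 1 :=
            pvBestC_le_step C _ _ (List.mem_append_left _ hbp) hb (by omega)
          have f3 : (a - c.toNat) - b.toNat = (a - b.toNat) - c.toNat := by omega
          rw [f3] at f2
          rw [hrec] at *
          omega
        · have heq : pvBestC C (p ++ [c]) (a - b.toNat) = pvBestC C p (a - b.toNat) :=
            pvBestC_append_of_not C p c _ (Or.inr (by omega))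
          omega
      · have hbeq : b = c := by simpa using hbc
        subst hbeq
        exact le_trans (min_le_right _ _) (by rfl)

-- the optimum is attained by some first block (min-attained decomposition)
theorem pvDecomp (C : Int) (bs : List Int) (a : Nat) (ha : a ≠ 0) (h : pvBestC C bs a < C) :
    ∃ b ∈ bs, 0 < b ∧ b ≤ (a : Int) ∧ pvBestC C bs a = pvBestC C bs (a - b.toNat) + 1 := by
  have he := pvBestC_eq C bs a ha
  rcases PySem.List.foldl_min_mem ((bs.filter (fun b => decide (0 < b ∧ b ≤ (a : Int)))).map
      (fun b => pvBestC C bs (a - b.toNat) + 1)) C with hm | hm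
  · rw [he, hm] at h; omega
  · rw [he] at h ⊢
    obtain ⟨b, hbmem, hbv⟩ := List.mem_map.mp hm
    have hbf := List.mem_filter.mp hbmem
    have hcond : 0 < b ∧ b ≤ (a : Int) := by simpa using hbf.2
    exact ⟨b, hbf.1, hcond.1, hcond.2, hbv.symm⟩

-- every level below the (uncapped) optimum is inhabited by a smaller amount
theorem pvIntermediate (C : Int) (bs : List Int) :
    ∀ (a : Nat) (k : Int), 0 ≤ k → k < pvBestC C bs a → pvBestC C bs a < C →
    ∃ a' : Nat, a' < a ∧ pvBestC C bs a' = k := by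
  intro a
  induction a using Nat.strong_induction_on with
  | _ a ih =>
    intro k hk0 hklt hltC
    have ha : a ≠ 0 := by
      intro h; subst h; rw [pvBestC_zero] at hklt; omega
    obtain ⟨b, hbmem, hb0, hba, hrec⟩ := pvDecomp C bs a ha hltC
    by_cases hk : pvBestC C bs (a - b.toNat) = k
    · exact ⟨a - b.toNat, by omega, hk⟩
    · obtain ⟨a', ha', hk'⟩ := ih (a - b.toNat) (by omega) k hk0 (by omega) (by omega)
      exact ⟨a', by omega, hk'⟩

-- raising the cap: pvBestC C₁ = min(pvBestC C₂, C₁) for C₁ ≤ C₂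
theorem pvFoldMinCap (C₁ : Int) : ∀ (l : List Int) (g₁ g₂ : Int → Int) (r₁ r₂ : Int),
    r₁ = min r₂ C₁ → (∀ x ∈ l, g₁ x = min (g₂ x) (C₁ + 1)) →
    (l.map g₁).foldl min r₁ = min ((l.map g₂).foldl min r₂) C₁ := by
  intro l
  induction l with
  | nil => intro g₁ g₂ r₁ r₂ hr _; simpa using hr
  | cons x t ih =>
      intro g₁ g₂ r₁ r₂ hr h
      simp only [List.map_cons, List.foldl_cons]
      refine ih g₁ g₂ _ _ ?_ (fun y hy => h y (List.mem_cons_of_mem _ hy))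
      have := h x (List.mem_cons_self)
      omega

theorem pvCap (C₁ C₂ : Int) (h0 : 0 ≤ C₁) (h12 : C₁ ≤ C₂) (bs : List Int) (a : Nat) :
    pvBestC C₁ bs a = min (pvBestC C₂ bs a) C₁ := by
  induction a using Nat.strong_induction_on with
  | _ a ih =>
    rcases Nat.eq_zero_or_pos a with h | h
    · subst h; rw [pvBestC_zero, pvBestC_zero]; omega
    · have ha : a ≠ 0 := by omega
      rw [pvBestC_eq C₁ bs a ha, pvBestC_eq C₂ bs a ha]
      refine pvFoldMinCap C₁ _ _ _ C₁ C₂ (by omega) ?_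
      intro b hb
      have hcond : 0 < b ∧ b ≤ (a : Int) := by simpa using (List.mem_filter.mp hb).2
      have := ih (a - b.toNat) (by omega)
      omega

-- restricting to the blocks that can ever be used (0 < b ≤ size) changes nothing below size
theorem pvFilter (C : Int) (bs : List Int) (size : Int) :
    ∀ a : Nat, (a : Int) ≤ size →
    pvBestC C bs a = pvBestC C (bs.filter (fun b => decide (0 < b) && decide (b ≤ size))) a := by
  intro a
  induction a using Nat.strong_induction_on with
  | _ a ih =>
    intro hsz
    rcases Nat.eq_zero_or_pos a with h | h
    · subst h; rw [pvBestC_zero, pvBestC_zero]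
    · have ha : a ≠ 0 := by omega
      rw [pvBestC_eq C bs a ha, pvBestC_eq C _ a ha, List.filter_filter]
      have hfil : bs.filter (fun (b : Int) => decide (0 < b ∧ b ≤ (a : Int))) =
          bs.filter (fun (b : Int) =>
            decide (0 < b ∧ b ≤ (a : Int)) && (decide (0 < b) && decide (b ≤ size))) := by
        refine List.filter_congr ?_
        intro b _
        by_cases h1 : 0 < b
        · by_cases h2 : b ≤ (a : Int)
          · simp [h1, h2]; omega
          · simp [h1, h2]
        · simp [h1]
      rw [← hfil]
      congr 1
      refine List.map_congr_left ?_
      intro b hbf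
      have hcond : 0 < b ∧ b ≤ (a : Int) := by simpa using (List.mem_filter.mp hbf).2
      have := ih (a - b.toNat) (by omega) (by omega)
      omega

-- ---- the A-side table lemmas (cap fixed at the port's literal 9999999) ----

-- indexing a table built as (List.range n).map f
theorem pvGetRange (f : Nat → Int) (n : Nat) (i : Int) (h0 : 0 ≤ i) (h1 : i < (n : Int)) :
    PySem.List.pyGetD ((List.range n).map f) i 0 = f i.toNat := by
  rw [PySem.List.pyGetD_eq_getElem _ 0 h0 (by simpa using h1)]
  simp

-- A's initial table is the table of pvBestC 9999999 over the empty block list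
theorem pvInit (n : Nat) :
    (List.replicate (n + 1) (9999999 : Int)).set 0 0 =
      (List.range (n + 1)).map (pvBestC 9999999 []) := by
  apply List.ext_getElem (by simp)
  intro i h1 h2
  rcases Nat.eq_zero_or_pos i with h | h
  · subst h
    simp [pvBestC_zero]
  · have hi : i ≠ 0 := by omega
    rw [List.getElem_set_ne (by omega)]
    simp only [List.getElem_replicate, List.getElem_map, List.getElem_range]
    rw [pvBestC_eq 9999999 [] i hi]
    simp

-- the mid-pass table: entries below j already relaxed with block c, the rest untouched
def pvMixed (n : Nat) (p : List Int) (c : Int) (j : Int) : List Int :=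
  (List.range (n + 1)).map (fun (x : Nat) =>
    if (x : Int) < j then pvBestC 9999999 (p ++ [c]) x else pvBestC 9999999 p x)

def pvUpd (c : Int) (t : List Int) (j : Int) : List Int :=
  PySem.List.pySetD t j (min (PySem.List.pyGetD t j 0) (PySem.List.pyGetD t (j - c) 0 + 1))

theorem pvMixed_start (n : Nat) (p : List Int) (c : Int) :
    pvMixed n p c c = (List.range (n + 1)).map (pvBestC 9999999 p) := by
  unfold pvMixed
  refine List.map_congr_left ?_
  intro x _
  by_cases hx : (x : Int) < c
  · rw [if_pos hx, pvBestC_append_of_not 9999999 p c x (Or.inr hx)]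
  · rw [if_neg hx]

theorem pvMixed_end (n : Nat) (p : List Int) (c : Int) (j : Int) (hj : (n : Int) < j) :
    pvMixed n p c j = (List.range (n + 1)).map (pvBestC 9999999 (p ++ [c])) := by
  unfold pvMixed
  refine List.map_congr_left ?_
  intro x hx
  have : x < n + 1 := List.mem_range.mp hx
  rw [if_pos (by omega)]

theorem pvUpdStep (n : Nat) (p : List Int) (c : Int) (j : Int) (hc : 0 < c) (hcj : c ≤ j)
    (hjn : j ≤ (n : Int)) :
    pvUpd c (pvMixed n p c j) j = pvMixed n p c (j + 1) := by
  have h0j : 0 ≤ j := by omega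
  have hlen : (pvMixed n p c j).length = n + 1 := by simp [pvMixed]
  have hget1 : PySem.List.pyGetD (pvMixed n p c j) j 0 = pvBestC 9999999 p j.toNat := by
    rw [show pvMixed n p c j = (List.range (n+1)).map
          (fun (x : Nat) => if (x : Int) < j then pvBestC 9999999 (p ++ [c]) x
            else pvBestC 9999999 p x) from rfl,
      pvGetRange _ _ _ h0j (by omega)]
    rw [if_neg (by omega)]
  have hget2 : PySem.List.pyGetD (pvMixed n p c j) (j - c) 0 =
      pvBestC 9999999 (p ++ [c]) (j - c).toNat := by
    rw [show pvMixed n p c j = (List.range (n+1)).map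
          (fun (x : Nat) => if (x : Int) < j then pvBestC 9999999 (p ++ [c]) x
            else pvBestC 9999999 p x) from rfl,
      pvGetRange _ _ _ (by omega) (by omega)]
    rw [if_pos (by omega)]
  unfold pvUpd
  rw [hget1, hget2, PySem.List.pySetD_of_nonneg _ _ h0j]
  have hrec : min (pvBestC 9999999 p j.toNat) (pvBestC 9999999 (p ++ [c]) (j - c).toNat + 1) =
      pvBestC 9999999 (p ++ [c]) j.toNat := by
    have := pvBestC_append_rec 9999999 (by norm_num) p c j.toNat hc (by omega)
    have harg : j.toNat - c.toNat = (j - c).toNat := by omega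
    rw [harg] at this
    omega
  rw [hrec]
  apply List.ext_getElem (by simp [pvMixed])
  intro i hi1 hi2
  have hin : i < n + 1 := by simpa [pvMixed] using hi2
  by_cases hij : i = j.toNat
  · subst hij
    rw [List.getElem_set_self (by simp [pvMixed]; omega)]
    simp only [pvMixed, List.getElem_map, List.getElem_range]
    rw [if_pos (by omega)]
  · rw [List.getElem_set_ne (by omega)]
    simp only [pvMixed, List.getElem_map, List.getElem_range]
    by_cases hlt : (i : Int) < j
    · rw [if_pos hlt, if_pos (by omega)]
    · rw [if_neg hlt, if_neg (by omega)]

theorem pvPass (n : Nat) (p : List Int) (c : Int) (hc : 0 < c) :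
    ∀ (k : Nat) (j : Int), ((n : Int) + 1) - j = (k : Int) → c ≤ j →
    (PySem.List.pyRange j ((n : Int) + 1) 1).foldl (pvUpd c) (pvMixed n p c j) =
    (List.range (n + 1)).map (pvBestC 9999999 (p ++ [c])) := by
  intro k
  induction k with
  | zero =>
      intro j hk hcj
      rw [PySem.List.pyRange_one_eq_nil (by omega), List.foldl_nil]
      exact pvMixed_end n p c j (by omega)
  | succ k ih =>
      intro j hk hcj
      rw [PySem.List.pyRange_one_cons (by omega), List.foldl_cons]
      rw [pvUpdStep n p c j hc hcj (by omega)]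
      exact ih (j + 1) (by omega) (by omega)

-- one full relaxation pass of block c on the finished table of p gives the table of p ++ [c]
theorem pvPassFull (n : Nat) (p : List Int) (c : Int) (hc : 0 ≤ c) :
    (PySem.List.pyRange c ((n : Int) + 1) 1).foldl (pvUpd c)
      ((List.range (n + 1)).map (pvBestC 9999999 p)) =
    (List.range (n + 1)).map (pvBestC 9999999 (p ++ [c])) := by
  rcases eq_or_lt_of_le hc with h0 | h0
  · -- c = 0: every update rewrites an entry to itself
    subst h0
    have hid : ∀ (t : List Int) (j : Int), j ∈ PySem.List.pyRange 0 ((n : Int) + 1) 1 →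
        pvUpd 0 t j = t := by
      intro t j hj
      have hj0 : 0 ≤ j := (PySem.List.mem_pyRange_one.mp hj).1
      unfold pvUpd
      rw [sub_zero, PySem.List.pySetD_of_nonneg _ _ hj0, min_eq_left (by omega)]
      by_cases hjl : j.toNat < t.length
      · rw [PySem.List.pyGetD_eq_getElem _ 0 hj0 (by omega)]
        exact List.set_getElem_self (by omega)
      · rw [List.set_eq_of_length_le (by omega)]
    calc (PySem.List.pyRange 0 ((n : Int) + 1) 1).foldl (pvUpd 0)
          ((List.range (n + 1)).map (pvBestC 9999999 p))
        = (PySem.List.pyRange 0 ((n : Int) + 1) 1).foldl (fun t _ => t)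
            ((List.range (n + 1)).map (pvBestC 9999999 p)) :=
          PySem.List.foldl_congr_mem _ _ _ _ (fun t j hj => hid t j hj)
      _ = (List.range (n + 1)).map (pvBestC 9999999 p) := PySem.List.foldl_ignore _ _
      _ = (List.range (n + 1)).map (pvBestC 9999999 (p ++ [0])) := by
          refine List.map_congr_left ?_
          intro x _
          exact (pvBestC_append_of_not 9999999 p 0 x (Or.inl le_rfl)).symm
  · by_cases hcn : c ≤ (n : Int) + 1
    · rw [← pvMixed_start n p c]
      exact pvPass n p c h0 ((n : Int) + 1 - c).toNat c (by omega) le_rfl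
    · rw [PySem.List.pyRange_one_eq_nil (by omega), List.foldl_nil]
      refine List.map_congr_left ?_
      intro x hx
      have : x < n + 1 := List.mem_range.mp hx
      exact (pvBestC_append_of_not 9999999 p c x (Or.inr (by omega))).symm

-- A's outer loop: one pass per used block, starting from the empty-block table
theorem pvOuter (bs : List Int) (n : Nat) :
    ∀ (k : Nat), k ≤ bs.length → (∀ b ∈ bs.take k, 0 ≤ b) →
    (PySem.List.pyRange 0 (k : Int) 1).foldl (fun t i =>
      (PySem.List.pyRange (PySem.List.pyGetD bs i 0) ((n : Int) + 1) 1).foldl (fun t j =>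
        PySem.List.pySetD t j (min (PySem.List.pyGetD t j 0)
          (PySem.List.pyGetD t (j - PySem.List.pyGetD bs i 0) 0 + 1))) t)
      ((List.range (n + 1)).map (pvBestC 9999999 [])) =
    (List.range (n + 1)).map (pvBestC 9999999 (bs.take k)) := by
  intro k
  induction k with
  | zero =>
      intro _ _
      rw [Nat.cast_zero, PySem.List.pyRange_one_eq_nil le_rfl, List.foldl_nil, List.take_zero]
  | succ k ih =>
      intro hk hpos
      have hcast : ((k + 1 : Nat) : Int) = (k : Int) + 1 := by push_cast; ring
      rw [hcast, PySem.List.pyRange_one_succ_right (by omega), List.foldl_append,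
        ih (by omega) (fun b hb => hpos b (by rw [List.take_add_one]; exact List.mem_append_left _ hb)),
        List.foldl_cons, List.foldl_nil]
      have hklen : k < bs.length := by omega
      have hb : PySem.List.pyGetD bs (k : Int) 0 = bs[k] := by
        rw [PySem.List.pyGetD_natCast, List.getD_eq_getElem _ _ hklen]
      have htake : bs.take (k + 1) = bs.take k ++ [bs[k]] := by
        rw [List.take_add_one, List.getElem?_eq_getElem hklen, Option.toList_some]
      have hbpos : 0 ≤ bs[k] := hpos bs[k] (by rw [htake]; exact List.mem_append_right _ (List.mem_singleton_self _))
      show (PySem.List.pyRange (PySem.List.pyGetD bs (k : Int) 0) ((n : Int) + 1) 1).foldl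
          (pvUpd (PySem.List.pyGetD bs (k : Int) 0))
          ((List.range (n + 1)).map (pvBestC 9999999 (bs.take k))) =
          (List.range (n + 1)).map (pvBestC 9999999 (bs.take (k + 1)))
      rw [hb, htake]
      exact pvPassFull n (bs.take k) bs[k] hbpos

-- B's block-prefix comprehension is List.take
theorem pvBlocks (bs : List Int) :
    ∀ (m : Nat), m ≤ bs.length →
    (PySem.List.pyRange 0 (m : Int) 1).map (fun i => PySem.List.pyGetD bs i 0) = bs.take m := by
  intro m
  induction m with
  | zero =>
      intro _
      rw [Nat.cast_zero, PySem.List.pyRange_one_eq_nil le_rfl, List.map_nil, List.take_zero]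
  | succ m ih =>
      intro hm
      have hmlen : m < bs.length := by omega
      have hcast : ((m + 1 : Nat) : Int) = (m : Int) + 1 := by push_cast; ring
      rw [hcast, PySem.List.pyRange_one_succ_right (by omega), List.map_append, ih (by omega),
        List.take_add_one, List.getElem?_eq_getElem hmlen, Option.toList_some, List.map_cons,
        List.map_nil, PySem.List.pyGetD_natCast, List.getD_eq_getElem _ _ hmlen]

-- bridges between the Array the A-port threads and the List the table lemmas speak about
theorem pvAGet_eq (xs : Array Int) (i : Int) (h : 0 ≤ i) :
    pvAGet xs i = PySem.List.pyGetD xs.toList i 0 := by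
  unfold pvAGet
  rw [show (if i < 0 then i + (xs.size : Int) else i) = i from if_neg (by omega), if_pos h]
  by_cases hi : i.toNat < xs.size
  · rw [PySem.List.pyGetD_eq_getElem _ 0 h (by simpa using (by omega : i < (xs.size : Int))),
      Array.getElem_toList]
    exact (Array.getElem_eq_getD 0).symm
  · rw [PySem.List.pyGetD_of_none _ _ _ ((PySem.List.pyGet?_eq_none_iff _ _).mpr
      (by simp [PySem.Raise.InRange]; omega))]
    unfold Array.getD
    rw [dif_neg hi]

theorem pvASet_toList (xs : Array Int) (i : Int) (v : Int) (h : 0 ≤ i) :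
    (pvASet xs i v).toList = PySem.List.pySetD xs.toList i v := by
  unfold pvASet
  rw [show (if i < 0 then i + (xs.size : Int) else i) = i from if_neg (by omega), if_pos h,
    Array.toList_setIfInBounds,
    PySem.List.pySetD_of_nonneg _ _ h]

theorem pvInnerBridge (b : Int) (hb : 0 ≤ b) (js : List Int) (hjs : ∀ j ∈ js, b ≤ j) :
    ∀ (t : Array Int),
    (js.foldl (fun t j => pvASet t j (min (pvAGet t j) (pvAGet t (j - b) + 1))) t).toList =
    js.foldl (fun t j => PySem.List.pySetD t j
      (min (PySem.List.pyGetD t j 0) (PySem.List.pyGetD t (j - b) 0 + 1))) t.toList := by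
  induction js with
  | nil => intro t; rfl
  | cons j js ih =>
      intro t
      have hj : b ≤ j := hjs j List.mem_cons_self
      rw [List.foldl_cons, List.foldl_cons,
        ih (fun x hx => hjs x (List.mem_cons_of_mem _ hx)),
        pvASet_toList _ _ _ (by omega), pvAGet_eq _ _ (by omega), pvAGet_eq _ _ (by omega)]

theorem pvOuterBridge (bs : List Int) (m : Int) (is : List Int)
    (his : ∀ i ∈ is, 0 ≤ PySem.List.pyGetD bs i 0) : ∀ (t : Array Int),
    (is.foldl (fun t i =>
      (PySem.List.pyRange (PySem.List.pyGetD bs i 0) m 1).foldl (fun t j =>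
        pvASet t j (min (pvAGet t j) (pvAGet t (j - PySem.List.pyGetD bs i 0) + 1))) t) t).toList =
    is.foldl (fun t i =>
      (PySem.List.pyRange (PySem.List.pyGetD bs i 0) m 1).foldl (fun t j =>
        PySem.List.pySetD t j (min (PySem.List.pyGetD t j 0)
          (PySem.List.pyGetD t (j - PySem.List.pyGetD bs i 0) 0 + 1))) t) t.toList := by
  induction is with
  | nil => intro t; rfl
  | cons i is ih =>
      intro t
      rw [List.foldl_cons, List.foldl_cons, ih (fun x hx => his x (List.mem_cons_of_mem _ hx)),
        pvInnerBridge (PySem.List.pyGetD bs i 0) (his i List.mem_cons_self) _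
          (fun j hj => (PySem.List.mem_pyRange_one.mp hj).1)]

-- ---- the B-side BFS lemmas ----

-- the inner block loop hits the target iff some block completes the amount
theorem pvInner_none_iff (size a : Int) : ∀ (us : List Int) (vis : PySem.Set Int) (nxt : List Int),
    pvBfsInner size a us vis nxt = none ↔ ∃ b ∈ us, a + b = size := by
  intro us
  induction us with
  | nil => intro vis nxt; simp [pvBfsInner]
  | cons b us ih =>
      intro vis nxt
      by_cases hhit : a + b = size
      · simp [pvBfsInner, hhit]
      · rw [pvBfsInner, if_neg hhit]
        by_cases hc : a + b < size ∧ PySem.Set.contains vis (a + b) = false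
        · rw [if_pos hc, ih]
          simp only [List.mem_cons]
          constructor
          · rintro ⟨b', hb', he⟩; exact ⟨b', Or.inr hb', he⟩
          · rintro ⟨b', hb' | hb', he⟩
            · exact absurd (hb' ▸ he) hhit
            · exact ⟨b', hb', he⟩
        · rw [if_neg hc, ih]
          simp only [List.mem_cons]
          constructor
          · rintro ⟨b', hb', he⟩; exact ⟨b', Or.inr hb', he⟩
          · rintro ⟨b', hb' | hb', he⟩
            · exact absurd (hb' ▸ he) hhit
            · exact ⟨b', hb', he⟩

-- the inner block loop, when it does not hit: what the new visited/nxt contain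
theorem pvInner_some_spec (size a : Int) :
    ∀ (us : List Int) (vis : PySem.Set Int) (nxt : List Int),
    (¬ ∃ b ∈ us, a + b = size) → (∀ x ∈ nxt, x ∈ vis) → vis.Nodup →
    ∃ v n, pvBfsInner size a us vis nxt = some (v, n) ∧
      (∀ x : Int, x ∈ v ↔ (x ∈ vis ∨ (x < size ∧ ∃ b ∈ us, x = a + b))) ∧
      (∀ x : Int, x ∈ n ↔ (x ∈ nxt ∨ (x ∉ vis ∧ x < size ∧ ∃ b ∈ us, x = a + b))) ∧
      (∀ x ∈ n, x ∈ v) ∧ v.Nodup ∧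
      vis.length + n.length = nxt.length + v.length := by
  intro us
  induction us with
  | nil =>
      intro vis nxt _ hsub hnd
      exact ⟨vis, nxt, rfl, by simp, by simp, hsub, hnd, by omega⟩
  | cons b us ih =>
      intro vis nxt hmiss hsub hnd
      have hhit : a + b ≠ size := by
        intro h; exact hmiss ⟨b, List.mem_cons_self, h⟩
      have hmiss' : ¬ ∃ b' ∈ us, a + b' = size := by
        rintro ⟨b', hb', he⟩; exact hmiss ⟨b', List.mem_cons_of_mem _ hb', he⟩
      rw [pvBfsInner, if_neg hhit]
      by_cases hc : a + b < size ∧ PySem.Set.contains vis (a + b) = false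
      · rw [if_pos hc]
        have hnmem : (a + b) ∉ vis := by
          intro h
          have hf : PySem.Set.contains vis (a + b) = true := List.contains_iff_mem.mpr h
          rw [hc.2] at hf
          simp at hf
        have hadd : PySem.Set.add vis (a + b) = vis ++ [a + b] := by
          unfold PySem.Set.add
          rw [hc.2]
          simp
        obtain ⟨v, n, heq, hv, hn, hnv, hndv, hlen⟩ :=
          ih (PySem.Set.add vis (a + b)) (nxt ++ [a + b]) hmiss'
            (by
              intro x hx
              rw [PySem.Set.mem_add]
              rcases List.mem_append.mp hx with h | h
              · exact Or.inl (hsub x h)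
              · exact Or.inr (by simpa using h))
            (PySem.Set.nodup_add vis (a + b) hnd)
        refine ⟨v, n, heq, ?_, ?_, hnv, hndv, ?_⟩
        · intro x
          rw [hv x, PySem.Set.mem_add]
          constructor
          · rintro ((h | h) | ⟨hlt, b', hb', he⟩)
            · exact Or.inl h
            · exact Or.inr ⟨h ▸ hc.1, b, List.mem_cons_self, h⟩
            · exact Or.inr ⟨hlt, b', List.mem_cons_of_mem _ hb', he⟩
          · rintro (h | ⟨hlt, b', hb', he⟩)
            · exact Or.inl (Or.inl h)
            · rcases List.mem_cons.mp hb' with hb'' | hb''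
              · exact Or.inl (Or.inr (hb'' ▸ he))
              · exact Or.inr ⟨hlt, b', hb'', he⟩
        · intro x
          rw [hn x, PySem.Set.mem_add]
          constructor
          · rintro (h | ⟨hnm, hlt, b', hb', he⟩)
            · rcases List.mem_append.mp h with h' | h'
              · exact Or.inl h'
              · have hx : x = a + b := by simpa using h'
                exact Or.inr ⟨hx ▸ hnmem, hx ▸ hc.1, b, List.mem_cons_self, hx⟩
            · exact Or.inr ⟨fun hx => hnm (Or.inl hx), hlt, b', List.mem_cons_of_mem _ hb', he⟩
          · rintro (h | ⟨hnm, hlt, b', hb', he⟩)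
            · exact Or.inl (List.mem_append_left _ h)
            · rcases List.mem_cons.mp hb' with hb'' | hb''
              · exact Or.inl (List.mem_append_right _ (by simp [he, hb'']))
              · by_cases hx : x = a + b
                · exact Or.inl (List.mem_append_right _ (by simp [hx]))
                · exact Or.inr ⟨fun h1 => h1.elim hnm hx, hlt, b', hb'', he⟩
        · have : (PySem.Set.add vis (a+b)).length = vis.length + 1 := by
            rw [hadd]; simp
          rw [this] at hlen
          have : (nxt ++ [a + b]).length = nxt.length + 1 := by simp
          rw [this] at hlen
          omega
      · rw [if_neg hc]
        -- the candidate a+b is skipped: it is ≥ size (and ≠ size, so > size) or already visited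
        have hskip : ¬ (a + b) < size ∨ (a + b) ∈ vis := by
          by_cases h1 : a + b < size
          · right
            by_cases h2 : PySem.Set.contains vis (a + b) = false
            · exact absurd ⟨h1, h2⟩ hc
            · have : PySem.Set.contains vis (a + b) = true := by
                cases hb : PySem.Set.contains vis (a + b)
                · exact absurd hb h2
                · rfl
              exact List.contains_iff_mem.mp this
          · exact Or.inl h1
        obtain ⟨v, n, heq, hv, hn, hnv, hndv, hlen⟩ := ih vis nxt hmiss' hsub hnd
        refine ⟨v, n, heq, ?_, ?_, hnv, hndv, hlen⟩
        · intro x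
          rw [hv x]
          constructor
          · rintro (h | ⟨hlt, b', hb', he⟩)
            · exact Or.inl h
            · exact Or.inr ⟨hlt, b', List.mem_cons_of_mem _ hb', he⟩
          · rintro (h | ⟨hlt, b', hb', he⟩)
            · exact Or.inl h
            · rcases List.mem_cons.mp hb' with hb'' | hb''
              · subst hb''
                rcases hskip with h' | h'
                · exact absurd (he ▸ hlt) h'
                · exact Or.inl (he ▸ h')
              · exact Or.inr ⟨hlt, b', hb'', he⟩
        · intro x
          rw [hn x]
          constructor
          · rintro (h | ⟨hnm, hlt, b', hb', he⟩)
            · exact Or.inl h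
            · exact Or.inr ⟨hnm, hlt, b', List.mem_cons_of_mem _ hb', he⟩
          · rintro (h | ⟨hnm, hlt, b', hb', he⟩)
            · exact Or.inl h
            · rcases List.mem_cons.mp hb' with hb'' | hb''
              · subst hb''
                rcases hskip with h' | h'
                · exact absurd (he ▸ hlt) h'
                · exact absurd (he ▸ h') hnm
              · exact Or.inr ⟨hnm, hlt, b', hb'', he⟩

-- one whole BFS level: hit iff some frontier amount is one block from the target;
-- otherwise the new visited/nxt are the old ones plus all one-block extensions below size
theorem pvLevel_spec (size : Int) (usable : List Int) :
    ∀ (fr : List Int) (vis : PySem.Set Int) (nxt : List Int),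
    (∀ x ∈ nxt, x ∈ vis) → vis.Nodup →
    ((∃ a ∈ fr, ∃ b ∈ usable, a + b = size) → pvBfsLevel size usable fr vis nxt = none) ∧
    (¬ (∃ a ∈ fr, ∃ b ∈ usable, a + b = size) →
      ∃ v n, pvBfsLevel size usable fr vis nxt = some (v, n) ∧
        (∀ x : Int, x ∈ v ↔ (x ∈ vis ∨ (x < size ∧ ∃ a ∈ fr, ∃ b ∈ usable, x = a + b))) ∧
        (∀ x : Int, x ∈ n ↔ (x ∈ nxt ∨ (x ∉ vis ∧ x < size ∧ ∃ a ∈ fr, ∃ b ∈ usable, x = a + b))) ∧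
        (∀ x ∈ n, x ∈ v) ∧ v.Nodup ∧
        vis.length + n.length = nxt.length + v.length) := by
  intro fr
  induction fr with
  | nil =>
      intro vis nxt hsub hnd
      refine ⟨by rintro ⟨a, ha, _⟩; exact absurd ha (List.not_mem_nil), ?_⟩
      intro _
      exact ⟨vis, nxt, rfl, by simp, by simp, hsub, hnd, by omega⟩
  | cons a fr ih =>
      intro vis nxt hsub hnd
      by_cases hhit : ∃ b ∈ usable, a + b = size
      · constructor
        · intro _
          rw [pvBfsLevel, (pvInner_none_iff size a usable vis nxt).mpr hhit]
        · intro h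
          exact absurd ⟨a, List.mem_cons_self, hhit⟩ h
      · obtain ⟨v₁, n₁, heq₁, hv₁, hn₁, hnv₁, hnd₁, hlen₁⟩ :=
          pvInner_some_spec size a usable vis nxt hhit hsub hnd
        have hrw : pvBfsLevel size usable (a :: fr) vis nxt =
            pvBfsLevel size usable fr v₁ n₁ := by
          rw [pvBfsLevel, heq₁]
        obtain ⟨ihnone, ihsome⟩ := ih v₁ n₁ hnv₁ hnd₁
        constructor
        · rintro ⟨a', ha', hb'⟩
          rcases List.mem_cons.mp ha' with h | h
          · exact absurd (h ▸ hb') hhit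
          · rw [hrw]; exact ihnone ⟨a', h, hb'⟩
        · intro hmiss
          have hmiss' : ¬ ∃ a' ∈ fr, ∃ b ∈ usable, a' + b = size := by
            rintro ⟨a', ha', hb'⟩; exact hmiss ⟨a', List.mem_cons_of_mem _ ha', hb'⟩
          obtain ⟨v, n, heq, hv, hn, hnv, hndv, hlen⟩ := ihsome hmiss'
          refine ⟨v, n, by rw [hrw]; exact heq, ?_, ?_, hnv, hndv, by omega⟩
          · intro x
            rw [hv x, hv₁ x]
            simp only [List.mem_cons]
            constructor
            · rintro ((h | ⟨hlt, b, hb, he⟩) | ⟨hlt, a', ha', b, hb, he⟩)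
              · exact Or.inl h
              · exact Or.inr ⟨hlt, a, Or.inl rfl, b, hb, he⟩
              · exact Or.inr ⟨hlt, a', Or.inr ha', b, hb, he⟩
            · rintro (h | ⟨hlt, a', ha' | ha', b, hb, he⟩)
              · exact Or.inl (Or.inl h)
              · exact Or.inl (Or.inr ⟨hlt, b, hb, ha' ▸ he⟩)
              · exact Or.inr ⟨hlt, a', ha', b, hb, he⟩
          · intro x
            rw [hn x, hn₁ x]
            simp only [List.mem_cons]
            constructor
            · rintro ((h | ⟨hnm, hlt, b, hb, he⟩) | ⟨hnm₁, hlt, a', ha', b, hb, he⟩)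
              · exact Or.inl h
              · exact Or.inr ⟨hnm, hlt, a, Or.inl rfl, b, hb, he⟩
              · refine Or.inr ⟨fun hx => hnm₁ ((hv₁ x).mpr (Or.inl hx)), hlt, a', Or.inr ha', b, hb, he⟩
            · rintro (h | ⟨hnm, hlt, a', ha' | ha', b, hb, he⟩)
              · exact Or.inl (Or.inl h)
              · exact Or.inl (Or.inr ⟨hnm, hlt, b, hb, ha' ▸ he⟩)
              · by_cases hx1 : x ∈ v₁
                · rcases (hv₁ x).mp hx1 with h | ⟨hlt', b', hb', he'⟩
                  · exact absurd h hnm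
                  · exact Or.inl (Or.inr ⟨hnm, hlt', b', hb', he'⟩)
                · exact Or.inr ⟨hx1, hlt, a', ha', b, hb, he⟩

-- a nodup subset of [0, size) has at most size elements
theorem pvVisBound (size : Int) (vis : List Int) (hnd : vis.Nodup)
    (h : ∀ x ∈ vis, 0 ≤ x ∧ x < size) : vis.length ≤ size.toNat := by
  have hsub : vis.toFinset ⊆ Finset.Ico (0 : Int) size := by
    intro x hx
    rw [List.mem_toFinset] at hx
    have := h x hx
    rw [Finset.mem_Ico]
    omega
  have hcard := Finset.card_le_card hsub
  rw [List.toFinset_card_of_nodup hnd, Int.card_Ico] at hcard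
  omega

-- the one-block step for Int-indexed amounts
theorem pvStepInt (C : Int) (usable : List Int) (x a b : Int) (hb : b ∈ usable) (hb0 : 0 < b)
    (ha0 : 0 ≤ a) (hx : x = a + b) :
    pvBestC C usable x.toNat ≤ pvBestC C usable a.toNat + 1 := by
  have hbx : b ≤ (x.toNat : Int) := by omega
  have hst := pvBestC_le_step C usable x.toNat hb hb0 hbx
  have harg : x.toNat - b.toNat = a.toNat := by omega
  rw [harg] at hst
  exact hst

-- an empty frontier at level k (below the target's level) means the target is unreachable
theorem pvEmpty (C size : Int) (usable : List Int) (hsz : 1 ≤ size) (hCbig : 10000001 ≤ C)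
    (k : Int) (hk0 : 0 ≤ k)
    (hfr : ∀ a : Int, ¬ (0 ≤ a ∧ a < size ∧ pvBestC C usable a.toNat = k))
    (hdk : k < pvBestC C usable size.toNat) :
    min (pvBestC C usable size.toNat) 9999999 = 9999999 := by
  by_contra hne
  have hlt : pvBestC C usable size.toNat < 9999999 := by omega
  obtain ⟨a', ha', hk'⟩ := pvIntermediate C usable size.toNat k hk0 hdk (by omega)
  refine hfr (a' : Int) ⟨by omega, by omega, ?_⟩
  rw [Int.toNat_natCast]
  exact hk'

-- BFS main loop invariant: frontier = level k, visited = levels ≤ k, target not yet found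
theorem pvBfs_eq (C size : Int) (usable : List Int) (hsz : 1 ≤ size) (hCbig : 10000001 ≤ C)
    (hus : ∀ b ∈ usable, 0 < b ∧ b ≤ size) :
    ∀ (fuel : Nat) (frontier : List Int) (vis : PySem.Set Int) (k : Int),
    0 ≤ k → k ≤ 9999999 →
    (∀ a : Int, a ∈ frontier ↔ (0 ≤ a ∧ a < size ∧ pvBestC C usable a.toNat = k)) →
    (∀ a : Int, a ∈ vis ↔ (0 ≤ a ∧ a < size ∧ pvBestC C usable a.toNat ≤ k)) →
    vis.Nodup →
    k < pvBestC C usable size.toNat →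
    (frontier ≠ [] → size.toNat + 2 ≤ fuel + vis.length) →
    pvBfs size usable fuel frontier vis k = min (pvBestC C usable size.toNat) 9999999 := by
  intro fuel
  induction fuel with
  | zero =>
      intro frontier vis k hk0 hk9 hfr hvis hnd hdk hfuel
      by_cases hfe : frontier = []
      · rw [show pvBfs size usable 0 frontier vis k = 9999999 from rfl]
        refine (pvEmpty C size usable hsz hCbig k hk0 ?_ hdk).symm
        intro a ha
        exact (by simp [hfe] : a ∉ frontier) ((hfr a).mpr ha)
      · have h1 := hfuel hfe
        have h2 := pvVisBound size vis hnd (fun x hx => ⟨((hvis x).mp hx).1, ((hvis x).mp hx).2.1⟩)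
        omega
  | succ fuel ih =>
      intro frontier vis k hk0 hk9 hfr hvis hnd hdk hfuel
      rw [pvBfs]
      by_cases hstop : frontier = [] ∨ 9999999 ≤ k
      · rw [if_pos hstop]
        rcases hstop with hfe | hk
        · refine (pvEmpty C size usable hsz hCbig k hk0 ?_ hdk).symm
          intro a ha
          exact (by simp [hfe] : a ∉ frontier) ((hfr a).mpr ha)
        · have hkeq : k = 9999999 := by omega
          omega
      · rw [if_neg hstop]
        have hfe : frontier ≠ [] := fun h => hstop (Or.inl h)
        have hklt : k < 9999999 := by
          by_contra h
          exact hstop (Or.inr (by omega))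
        obtain ⟨hlnone, hlsome⟩ := pvLevel_spec size usable frontier vis [] (by simp) hnd
        by_cases hhit : ∃ a ∈ frontier, ∃ b ∈ usable, a + b = size
        · rw [hlnone hhit]
          show k + 1 = min (pvBestC C usable size.toNat) 9999999
          obtain ⟨a, ha, b, hb, he⟩ := hhit
          obtain ⟨ha0, hasz, hak⟩ := (hfr a).mp ha
          have hstep : pvBestC C usable size.toNat ≤ k + 1 := by
            have := pvStepInt C usable size a b hb (hus b hb).1 ha0 he.symm
            omega
          omega
        · obtain ⟨v, n, heq, hv, hn, hnv, hndv, hlen⟩ := hlsome hhit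
          rw [heq]
          show pvBfs size usable fuel n v (k + 1) = min (pvBestC C usable size.toNat) 9999999
          -- the target is not at level k+1 (no frontier amount is one block away)
          have hdk1 : k + 1 < pvBestC C usable size.toNat := by
            by_contra hle
            have hdeq : pvBestC C usable size.toNat = k + 1 := by omega
            have hsz0 : size.toNat ≠ 0 := by omega
            obtain ⟨b, hbmem, hb0, hba, hrec⟩ :=
              pvDecomp C usable size.toNat hsz0 (by omega)
            have hfr' : (size - b) ∈ frontier := by
              refine (hfr (size - b)).mpr ⟨by omega, by omega, ?_⟩
              have harg : (size - b).toNat = size.toNat - b.toNat := by omega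
              rw [harg]
              omega
            exact hhit ⟨size - b, hfr', b, hbmem, by omega⟩
          -- the new frontier is exactly level k+1, the new visited levels ≤ k+1
          have hfr2 : ∀ a : Int, a ∈ n ↔ (0 ≤ a ∧ a < size ∧ pvBestC C usable a.toNat = k + 1) := by
            intro x
            rw [hn x]
            constructor
            · rintro (h | ⟨hnm, hlt, a, ha, b, hb, he⟩)
              · exact absurd h (List.not_mem_nil)
              · obtain ⟨ha0, hasz, hak⟩ := (hfr a).mp ha
                have hb' := hus b hb
                have hx0 : 0 ≤ x := by omega
                have hle : pvBestC C usable x.toNat ≤ k + 1 := by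
                  have := pvStepInt C usable x a b hb hb'.1 ha0 he
                  omega
                have hgt : ¬ pvBestC C usable x.toNat ≤ k := by
                  intro hc
                  exact hnm ((hvis x).mpr ⟨hx0, hlt, hc⟩)
                exact ⟨hx0, hlt, by omega⟩
            · rintro ⟨hx0, hxsz, hxk⟩
              have hx0' : x.toNat ≠ 0 := by
                intro hz
                rw [hz, pvBestC_zero] at hxk
                omega
              obtain ⟨b, hbmem, hb0, hba, hrec⟩ :=
                pvDecomp C usable x.toNat hx0' (by omega)
              have ha' : (x - b) ∈ frontier := by
                refine (hfr (x - b)).mpr ⟨by omega, by omega, ?_⟩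
                have harg : (x - b).toNat = x.toNat - b.toNat := by omega
                rw [harg]
                omega
              refine Or.inr ⟨?_, hxsz, x - b, ha', b, hbmem, by omega⟩
              intro hx
              have := ((hvis x).mp hx).2.2
              omega
          have hvis2 : ∀ a : Int, a ∈ v ↔ (0 ≤ a ∧ a < size ∧ pvBestC C usable a.toNat ≤ k + 1) := by
            intro x
            rw [hv x]
            constructor
            · rintro (h | ⟨hlt, a, ha, b, hb, he⟩)
              · obtain ⟨h1, h2, h3⟩ := (hvis x).mp h
                exact ⟨h1, h2, by omega⟩
              · obtain ⟨ha0, hasz, hak⟩ := (hfr a).mp ha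
                have hb' := hus b hb
                have hx0 : 0 ≤ x := by omega
                have := pvStepInt C usable x a b hb hb'.1 ha0 he
                exact ⟨hx0, hlt, by omega⟩
            · rintro ⟨hx0, hxsz, hxk⟩
              by_cases hle : pvBestC C usable x.toNat ≤ k
              · exact Or.inl ((hvis x).mpr ⟨hx0, hxsz, hle⟩)
              · have hxk1 : pvBestC C usable x.toNat = k + 1 := by omega
                have := (hfr2 x).mpr ⟨hx0, hxsz, hxk1⟩
                rcases (hn x).mp this with h | ⟨_, hlt, a, ha, b, hb, he⟩
                · exact absurd h (List.not_mem_nil)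
                · exact Or.inr ⟨hlt, a, ha, b, hb, he⟩
          refine ih n v (k + 1) (by omega) (by omega) hfr2 hvis2 hndv hdk1 ?_
          intro hne
          have hnlen : 1 ≤ n.length := by
            rcases n with _ | ⟨x, t⟩
            · exact absurd rfl hne
            · simp
          have := hfuel hfe
          simp only [List.length_nil] at hlen
          omega

-- the B port's initial BFS state satisfies the invariant at level 0
theorem pvBfs_init (C size : Int) (usable : List Int) (hsz : 1 ≤ size) (hCbig : 10000001 ≤ C)
    (hus : ∀ b ∈ usable, 0 < b ∧ b ≤ size) :
    pvBfs size usable (size.toNat + 1) [0] (PySem.Set.ofList [0]) 0 =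
      min (pvBestC C usable size.toNat) 9999999 := by
  have hof : PySem.Set.ofList [(0 : Int)] = [0] := rfl
  rw [hof]
  have hzero : ∀ a : Int, (0 ≤ a ∧ a < size ∧ pvBestC C usable a.toNat = 0) ↔ a = 0 := by
    intro a
    constructor
    · rintro ⟨h0, hsz', hk⟩
      by_contra hne
      have : a.toNat ≠ 0 := by omega
      have := pvBestC_pos C (by omega) usable a.toNat this
      omega
    · rintro rfl
      exact ⟨le_rfl, by omega, by rw [Int.toNat_zero, pvBestC_zero]⟩
  have hd0 : 0 < pvBestC C usable size.toNat := by
    have : size.toNat ≠ 0 := by omega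
    have := pvBestC_pos C (by omega) usable size.toNat this
    omega
  refine pvBfs_eq C size usable hsz hCbig hus (size.toNat + 1) [0] [0] 0 le_rfl (by norm_num)
    ?_ ?_ (by simp) hd0 ?_
  · intro a
    rw [hzero a]
    simp
  · intro a
    constructor
    · intro h
      have : a = 0 := by simpa using h
      subst this
      exact ⟨le_rfl, by omega, by rw [Int.toNat_zero, pvBestC_zero]⟩
    · rintro ⟨h0, hsz', hk⟩
      have : a = 0 := by
        by_contra hne
        have : a.toNat ≠ 0 := by omega
        have := pvBestC_pos C (by omega) usable a.toNat this
        omega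
      simp [this]
  · intro _
    simp

-- ===== VERDICT (by name: the statement is the Claim_ definition above) =====
theorem min_blocks_spec : Claim_equal_min_blocks := by
  intro bs nb size _hdom hpre
  unfold Spec_min_blocks
  obtain ⟨hne, hlast, himp⟩ := hpre
  by_cases hmod : PySem.Int.mod size (PySem.List.pyGetD bs (-1) 0) = 0
  · simp only [min_blocks, min_blocks_alt, if_pos hmod]
  · obtain ⟨hsz0, hnb, hpos⟩ := himp hmod
    have hszne : size ≠ 0 := by
      intro h
      exact hmod (by rw [h]; exact (PySem.Int.mod_eq_zero_iff_dvd 0 _).mpr (dvd_zero _))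
    obtain ⟨n, hn, hn1⟩ : ∃ n : Nat, size = (n : Int) ∧ 1 ≤ n := ⟨size.toNat, by omega, by omega⟩
    have his : ∀ i ∈ PySem.List.pyRange 0 nb 1, 0 ≤ PySem.List.pyGetD bs i 0 := by
      intro i hi
      obtain ⟨h0i, hinb⟩ := PySem.List.mem_pyRange_one.mp hi
      have hilen : i.toNat < bs.length := by omega
      rw [show i = ((i.toNat : Nat) : Int) from by omega, PySem.List.pyGetD_natCast,
        List.getD_eq_getElem _ _ hilen]
      refine hpos bs[i.toNat] ?_
      have hlt : i.toNat < (bs.take nb.toNat).length := by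
        rw [List.length_take]; omega
      have := List.getElem_take (xs := bs) (j := nb.toNat) (i := i.toNat) (h := hlt)
      rw [← this]
      exact List.getElem_mem hlt
    simp only [min_blocks, min_blocks_alt, if_neg hmod]
    rw [hn]
    have hcast : ((n : Int) + 1).toNat = n + 1 := by omega
    -- A's side: the finished relaxation table, read at index size
    rw [hcast, pvAGet_eq _ _ (by omega),
      pvOuterBridge bs ((n : Int) + 1) _ his,
      pvASet_toList _ _ _ le_rfl, Array.toList_replicate,
      PySem.List.pySetD_of_nonneg _ _ le_rfl]
    simp only [Int.toNat_zero]
    rw [pvInit n]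
    -- B's side: BFS over the usable blocks, with a raised reference cap C
    set C : Int := (n : Int) + 10000000 with hCdef
    have hCbig : 10000001 ≤ C := by omega
    have hton : ((n : Int)).toNat = n := by omega
    by_cases hnb0 : 0 ≤ nb
    · have hnbc : nb = (nb.toNat : Int) := by omega
      rw [hnbc, pvOuter bs n nb.toNat (by omega) hpos, pvBlocks bs nb.toNat (by omega),
        pvGetRange _ _ _ (by omega) (by omega)]
      set q := fun b => decide (0 < b) && decide (b ≤ (n : Int)) with hq
      have hus : ∀ b ∈ (bs.take nb.toNat).filter q, 0 < b ∧ b ≤ (n : Int) := by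
        intro b hb
        have := (List.mem_filter.mp hb).2
        rw [hq] at this
        simp only [Bool.and_eq_true, decide_eq_true_eq] at this
        exact this
      rw [pvBfs_init C (n : Int) _ (by omega) hCbig hus, hton]
      rw [pvFilter 9999999 (bs.take nb.toNat) (n : Int) n le_rfl]
      rw [pvCap 9999999 C (by norm_num) (by omega) _ n]
    · rw [PySem.List.pyRange_one_eq_nil (by omega)]
      simp only [List.foldl_nil, List.map_nil, List.filter_nil]
      rw [pvGetRange _ _ _ (by omega) (by omega)]
      have hus : ∀ b ∈ ([] : List Int), 0 < b ∧ b ≤ (n : Int) := by simp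
      rw [pvBfs_init C (n : Int) [] (by omega) hCbig hus, hton]
      rw [pvCap 9999999 C (by norm_num) (by omega) [] n]
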